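-- pv_equiv track=rewrite | github.com/basilvetas/crypto | Factor.py | powOfAPlusBSqrtD
-- ===== SOURCE A (Python) =====
-- def prodElts(ll1, ll2, d, m):
-- 	a = ll1[0]
-- 	b = ll1[1]
-- 	c = ll2[0]
-- 	e = ll2[1]
-- 	return [ (a*c + b*e*d)%m, (a*e + b*c)%m]
--
-- def powOfAPlusBSqrtD(ll, m, d, n):
-- 	if(m == 0):
-- 		return [1, 0]
-- 	elif (m == 1):
-- 		return ll
-- 	elif (m == 2):
-- 		return prodElts(ll, ll, d, n)
-- 	else:
-- 		ll1 = powOfAPlusBSqrtD(ll, m%2, d, n)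
-- 		ll2 = powOfAPlusBSqrtD(powOfAPlusBSqrtD(ll, m//2, d, n), 2, d, n)
-- 		return prodElts(ll1, ll2, d, n)
-- ===== SOURCE B (Python) =====
-- def prodElts(ll1, ll2, d, m):
--     a = ll1[0]
--     b = ll1[1]
--     c = ll2[0]
--     e = ll2[1]
--     return [(a*c + b*e*d) % m, (a*e + b*c) % m]
--
-- def powOfAPlusBSqrtD(ll, m, d, n):
--     if m == 0:
--         return [1, 0]
--     if m == 1:
--         return ll
--     result = [1, 0]
--     base = ll
--     while m > 0:
--         if m % 2 == 1:
--             result = prodElts(result, base, d, n)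
--         base = prodElts(base, base, d, n)
--         m //= 2
--     return result
-- ===== Notes on version B (the rewrite author's own statement) =====
-- stated objective: alternative
-- what changed: Replaces A's three-way recursion (m%2 factor, recursive square of the m//2 power) by a single iterative binary exponentiation loop over result/base, reusing prodElts; Pre_ excludes only inputs where A raises (m<0 RecursionError, and for m>=2 short lists / n==0).
import Mathlib
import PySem

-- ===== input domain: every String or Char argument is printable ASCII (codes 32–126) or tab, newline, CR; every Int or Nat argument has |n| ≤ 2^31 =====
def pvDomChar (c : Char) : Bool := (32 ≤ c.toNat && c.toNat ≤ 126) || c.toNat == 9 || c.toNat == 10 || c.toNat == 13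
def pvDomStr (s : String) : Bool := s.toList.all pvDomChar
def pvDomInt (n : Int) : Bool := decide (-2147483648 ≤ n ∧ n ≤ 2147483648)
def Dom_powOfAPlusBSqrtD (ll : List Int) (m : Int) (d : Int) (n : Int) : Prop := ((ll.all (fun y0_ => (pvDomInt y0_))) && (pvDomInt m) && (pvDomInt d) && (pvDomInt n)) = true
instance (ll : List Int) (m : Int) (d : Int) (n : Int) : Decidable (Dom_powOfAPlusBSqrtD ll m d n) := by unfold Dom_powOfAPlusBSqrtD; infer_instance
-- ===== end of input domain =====

-- B replaces A's three-way recursion by an iterative binary-exponentiation loop (alternative decomposition, same cost).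

-- ===== PORT A =====
-- list indexing ll1[0]/ll1[1] via pyGetD: exact under Pre_ (lists have length ≥ 2 whenever prodElts runs)
def prodElts (ll1 ll2 : List Int) (d m : Int) : List Int :=
  let a := PySem.List.pyGetD ll1 0 0
  let b := PySem.List.pyGetD ll1 1 0
  let c := PySem.List.pyGetD ll2 0 0
  let e := PySem.List.pyGetD ll2 1 0
  [PySem.Int.mod (a*c + b*e*d) m, PySem.Int.mod (a*e + b*c) m]

-- the 'm < 0' guard only makes the recursion total: Python diverges there (RecursionError), outside Pre_
def powOfAPlusBSqrtD (ll : List Int) (m : Int) (d : Int) (n : Int) : List Int :=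
  if _hneg : m < 0 then []
  else if m = 0 then [1, 0]
  else if m = 1 then ll
  else if m = 2 then prodElts ll ll d n
  else
    let ll1 := powOfAPlusBSqrtD ll (PySem.Int.mod m 2) d n
    let ll2 := powOfAPlusBSqrtD (powOfAPlusBSqrtD ll (PySem.Int.floordiv m 2) d n) 2 d n
    prodElts ll1 ll2 d n
termination_by m.toNat
decreasing_by
  · have h1 := PySem.Int.mod_nonneg m (b := 2) (by norm_num)
    have h2 := PySem.Int.mod_lt m (b := 2) (by norm_num)
    omega
  · rw [PySem.Int.floordiv_eq_ediv_of_pos (by norm_num)]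
    omega
  · omega

-- ===== PORT B =====
def powLoopB (d n : Int) (result base : List Int) (m : Int) : List Int :=
  if _h : m > 0 then
    let result' := if PySem.Int.mod m 2 = 1 then prodElts result base d n else result
    powLoopB d n result' (prodElts base base d n) (PySem.Int.floordiv m 2)
  else result
termination_by m.toNat
decreasing_by
  rw [PySem.Int.floordiv_eq_ediv_of_pos (by norm_num)]
  omega

def powOfAPlusBSqrtD_alt (ll : List Int) (m : Int) (d : Int) (n : Int) : List Int :=
  if m = 0 then [1, 0]
  else if m = 1 then ll
  else powLoopB d n [1, 0] ll m

-- ===== PRECONDITION & SPEC =====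
-- Pre_ excludes exactly the inputs where A raises: m < 0 (RecursionError), and for m ≥ 2
-- lists shorter than 2 (IndexError) or n = 0 (ZeroDivisionError).
def Pre_powOfAPlusBSqrtD (ll : List Int) (m : Int) (d : Int) (n : Int) : Prop :=
  0 ≤ m ∧ (2 ≤ m → 2 ≤ ll.length ∧ n ≠ 0)
instance (ll : List Int) (m : Int) (d : Int) (n : Int) : Decidable (Pre_powOfAPlusBSqrtD ll m d n) := by unfold Pre_powOfAPlusBSqrtD; infer_instance
def pvWitness_powOfAPlusBSqrtD : List Int × Int × Int × Int := ([2, 3], 5, 7, 11)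

def Spec_powOfAPlusBSqrtD (ll : List Int) (m : Int) (d : Int) (n : Int) (out : List Int) : Prop := out = powOfAPlusBSqrtD_alt ll m d n
instance (ll : List Int) (m : Int) (d : Int) (n : Int) (out : List Int) : Decidable (Spec_powOfAPlusBSqrtD ll m d n out) := by unfold Spec_powOfAPlusBSqrtD; infer_instance

-- ===== CLAIM (what is proved, stated in full; the proofs are below) =====
def Claim_equal_powOfAPlusBSqrtD : Prop := ∀ (ll : List Int) (m : Int) (d : Int) (n : Int), Dom_powOfAPlusBSqrtD ll m d n → Pre_powOfAPlusBSqrtD ll m d n → Spec_powOfAPlusBSqrtD ll m d n (powOfAPlusBSqrtD ll m d n)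

-- ===== LEMMAS AND PROOFS =====

-- pure (unreduced) arithmetic of a + b*sqrt(d) as pairs
def pmul (d : Int) (x y : Int × Int) : Int × Int :=
  (x.1 * y.1 + x.2 * y.2 * d, x.1 * y.2 + x.2 * y.1)

def spow (d : Int) (x : Int × Int) : Nat → Int × Int
  | 0 => (1, 0)
  | k + 1 => pmul d x (spow d x k)

def pairOf (u : List Int) : Int × Int := (PySem.List.pyGetD u 0 0, PySem.List.pyGetD u 1 0)

def red (n : Int) (x : Int × Int) : Int × Int := (PySem.Int.mod x.1 n, PySem.Int.mod x.2 n)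

def cong (n : Int) (x y : Int × Int) : Prop := x.1 ≡ y.1 [ZMOD n] ∧ x.2 ≡ y.2 [ZMOD n]

theorem modeq_pymod (a n : Int) : PySem.Int.mod a n ≡ a [ZMOD n] := by
  have h := PySem.Int.floordiv_mul_add_mod a n
  refine Int.modEq_iff_dvd.mpr ⟨PySem.Int.floordiv a n, ?_⟩
  rw [Int.mul_comm]
  omega

theorem pymod_congr {a b n : Int} (hn : n ≠ 0) (h : a ≡ b [ZMOD n]) :
    PySem.Int.mod a n = PySem.Int.mod b n := by
  have hc : PySem.Int.mod a n ≡ PySem.Int.mod b n [ZMOD n] :=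
    ((modeq_pymod a n).trans h).trans (modeq_pymod b n).symm
  have hd : |n| ∣ (PySem.Int.mod b n - PySem.Int.mod a n) := (abs_dvd _ _).mpr hc.dvd
  have hb : |PySem.Int.mod b n - PySem.Int.mod a n| < |n| := by
    rcases lt_or_gt_of_ne hn with hneg | hpos
    · have h1 := PySem.Int.mod_neg_bounds a (b := n) hneg
      have h2 := PySem.Int.mod_neg_bounds b (b := n) hneg
      rw [abs_lt, abs_of_neg hneg]
      omega
    · have h1a := PySem.Int.mod_nonneg a (b := n) hpos
      have h1b := PySem.Int.mod_lt a (b := n) hpos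
      have h2a := PySem.Int.mod_nonneg b (b := n) hpos
      have h2b := PySem.Int.mod_lt b (b := n) hpos
      rw [abs_lt, abs_of_pos hpos]
      omega
  have h0 := Int.eq_zero_of_abs_lt_dvd hd hb
  omega

theorem cong_refl (n : Int) (x : Int × Int) : cong n x x := ⟨Int.ModEq.refl _, Int.ModEq.refl _⟩

theorem cong_trans {n : Int} {x y z : Int × Int} (h1 : cong n x y) (h2 : cong n y z) : cong n x z :=
  ⟨h1.1.trans h2.1, h1.2.trans h2.2⟩

theorem red_cong_eq {n : Int} (hn : n ≠ 0) {x y : Int × Int} (h : cong n x y) :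
    red n x = red n y := by
  simp only [red, Prod.mk.injEq]
  exact ⟨pymod_congr hn h.1, pymod_congr hn h.2⟩

theorem cong_red (n : Int) (x : Int × Int) : cong n (red n x) x :=
  ⟨modeq_pymod _ _, modeq_pymod _ _⟩

theorem pmul_cong {n d : Int} {x x' y y' : Int × Int} (hx : cong n x x') (hy : cong n y y') :
    cong n (pmul d x y) (pmul d x' y') :=
  ⟨(hx.1.mul hy.1).add ((hx.2.mul hy.2).mul (Int.ModEq.refl d)),
   (hx.1.mul hy.2).add (hx.2.mul hy.1)⟩

theorem pmul_one (d : Int) (x : Int × Int) : pmul d x (1, 0) = x := by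
  simp [pmul]

theorem one_pmul (d : Int) (x : Int × Int) : pmul d (1, 0) x = x := by
  simp [pmul]

theorem pmul_assoc (d : Int) (x y z : Int × Int) :
    pmul d (pmul d x y) z = pmul d x (pmul d y z) := by
  simp only [pmul, Prod.mk.injEq]; constructor <;> ring

theorem spow_cong {n d : Int} {x y : Int × Int} (h : cong n x y) (k : Nat) :
    cong n (spow d x k) (spow d y k) := by
  induction k with
  | zero => exact cong_refl n _
  | succ k ih => exact pmul_cong h ih

theorem spow_add (d : Int) (x : Int × Int) (j k : Nat) :
    spow d x (j + k) = pmul d (spow d x j) (spow d x k) := by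
  induction j with
  | zero => simp [spow, one_pmul]
  | succ j ih =>
      have hj : j + 1 + k = (j + k) + 1 := by omega
      rw [hj, spow, ih, spow, ← pmul_assoc]

theorem spow_sq (d : Int) (x : Int × Int) (k : Nat) :
    spow d (pmul d x x) k = spow d x (2 * k) := by
  induction k with
  | zero => rfl
  | succ k ih =>
      have h2 : 2 * (k + 1) = 2 + 2 * k := by omega
      rw [spow, ih, h2, spow_add]
      simp [spow, pmul_one]

theorem prodElts_eq (u v : List Int) (d n : Int) :
    prodElts u v d n = [(red n (pmul d (pairOf u) (pairOf v))).1, (red n (pmul d (pairOf u) (pairOf v))).2] := rfl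

theorem pairOf_pair (x y : Int) : pairOf [x, y] = (x, y) := by
  simp [pairOf, PySem.List.pyGetD_zero_cons]
  rfl

theorem pairOf_redL (n : Int) (z : Int × Int) : pairOf [(red n z).1, (red n z).2] = red n z := by
  rw [pairOf_pair]

-- A computes, for every exponent 2 ≤ m, the reduced pure power
theorem A_spec (ll : List Int) (d n : Int) (hn : n ≠ 0) :
    ∀ m : Int, 2 ≤ m →
      powOfAPlusBSqrtD ll m d n
        = [(red n (spow d (pairOf ll) m.toNat)).1, (red n (spow d (pairOf ll) m.toNat)).2] := by
  intro m hm
  induction hk : m.toNat using Nat.strong_induction_on generalizing m with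
  | _ K IH =>
  by_cases h2 : m = 2
  · subst h2
    rw [powOfAPlusBSqrtD]
    norm_num
    have h2p : spow d (pairOf ll) (Int.toNat 2) = pmul d (pairOf ll) (pairOf ll) := by
      show spow d (pairOf ll) 2 = _
      simp [spow, pmul_one]
    rw [prodElts_eq, ← hk, h2p]
  · have hm3 : 3 ≤ m := by omega
    rw [powOfAPlusBSqrtD]
    simp only [show ¬ m < 0 by omega, if_neg (show m ≠ 0 by omega),
      if_neg (show m ≠ 1 by omega), if_neg (show m ≠ 2 by omega), dite_false]
    have hfd : PySem.Int.floordiv m 2 = m / 2 := PySem.Int.floordiv_eq_ediv_of_pos (by norm_num)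
    have hmd : PySem.Int.mod m 2 = m % 2 := PySem.Int.mod_eq_emod_of_pos (by norm_num)
    set p := pairOf ll with hp
    have hll1 : cong n (pairOf (powOfAPlusBSqrtD ll (PySem.Int.mod m 2) d n)) (spow d p (m % 2).toNat) := by
      rw [hmd]
      rcases Int.emod_two_eq m with he | he <;> rw [he]
      · rw [powOfAPlusBSqrtD]
        norm_num
        rw [pairOf_pair]
        exact cong_refl n _
      · rw [powOfAPlusBSqrtD]
        norm_num
        rw [show spow d p 1 = p from by simp [spow, pmul_one]]
        exact cong_refl n _
    have hhalf : cong n (pairOf (powOfAPlusBSqrtD ll (PySem.Int.floordiv m 2) d n)) (spow d p (m / 2).toNat) := by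
      rw [hfd]
      by_cases h1 : m / 2 = 1
      · rw [h1, powOfAPlusBSqrtD]
        norm_num
        rw [show spow d p 1 = p from by simp [spow, pmul_one]]
        exact cong_refl n _
      · have h2' : 2 ≤ m / 2 := by omega
        rw [IH (m / 2).toNat (by omega) (m / 2) h2' rfl, pairOf_redL]
        exact cong_red n _
    have hll2 : cong n (pairOf (powOfAPlusBSqrtD (powOfAPlusBSqrtD ll (PySem.Int.floordiv m 2) d n) 2 d n))
        (spow d p (2 * (m / 2)).toNat) := by
      rw [powOfAPlusBSqrtD]
      norm_num
      rw [prodElts_eq, pairOf_redL]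
      refine cong_trans (cong_red n _) ?_
      rw [show (2 * (m / 2)).toNat = (m / 2).toNat + (m / 2).toNat by omega, spow_add]
      have hhalf' := hhalf
      rw [hfd] at hhalf'
      exact pmul_cong hhalf' hhalf'
    rw [prodElts_eq]
    have hfin : red n (pmul d (pairOf (powOfAPlusBSqrtD ll (PySem.Int.mod m 2) d n))
        (pairOf (powOfAPlusBSqrtD (powOfAPlusBSqrtD ll (PySem.Int.floordiv m 2) d n) 2 d n)))
        = red n (spow d p K) := by
      apply red_cong_eq hn
      refine cong_trans (pmul_cong hll1 hll2) ?_
      rw [← spow_add, show (m % 2).toNat + (2 * (m / 2)).toNat = K by omega]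
      exact cong_refl n _
    rw [hfin]

-- B's loop computes the reduced product of the accumulator with the pure power of the base
theorem loop_spec (d n : Int) (hn : n ≠ 0) :
    ∀ m : Int, 1 ≤ m → ∀ res base : List Int,
      powLoopB d n res base m
        = [(red n (pmul d (pairOf res) (spow d (pairOf base) m.toNat))).1,
           (red n (pmul d (pairOf res) (spow d (pairOf base) m.toNat))).2] := by
  intro m hm
  induction hk : m.toNat using Nat.strong_induction_on generalizing m with
  | _ K IH =>
  intro res base
  rw [powLoopB, dif_pos (show m > 0 by omega)]
  have hfd : PySem.Int.floordiv m 2 = m / 2 := PySem.Int.floordiv_eq_ediv_of_pos (by norm_num)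
  have hmd : PySem.Int.mod m 2 = m % 2 := PySem.Int.mod_eq_emod_of_pos (by norm_num)
  by_cases h1 : m = 1
  · subst h1
    rw [← hk, if_pos (show PySem.Int.mod 1 2 = 1 by decide), hfd]
    norm_num
    rw [powLoopB]
    norm_num
    rw [prodElts_eq, show spow d (pairOf base) 1 = pairOf base from by simp [spow, pmul_one]]
  · have hm2 : 2 ≤ m := by omega
    have hrec := IH (m / 2).toNat (by omega) (m / 2) (by omega) rfl
      (if PySem.Int.mod m 2 = 1 then prodElts res base d n else res) (prodElts base base d n)
    rw [hfd, hrec]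
    have hbase : cong n (spow d (pairOf (prodElts base base d n)) (m / 2).toNat)
        (spow d (pairOf base) (2 * (m / 2).toNat)) := by
      rw [← spow_sq]
      apply spow_cong
      rw [prodElts_eq, pairOf_redL]
      exact cong_red n _
    have hres : cong n (pairOf (if PySem.Int.mod m 2 = 1 then prodElts res base d n else res))
        (pmul d (pairOf res) (spow d (pairOf base) (m % 2).toNat)) := by
      rcases Int.emod_two_eq m with he | he
      · rw [show PySem.Int.mod m 2 = 0 by rw [hmd, he], if_neg (by norm_num), he]
        rw [show spow d (pairOf base) (Int.toNat 0) = (1, 0) from rfl, pmul_one]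
        exact cong_refl n _
      · rw [show PySem.Int.mod m 2 = 1 by rw [hmd, he], if_pos rfl, he]
        rw [prodElts_eq, pairOf_redL]
        refine cong_trans (cong_red n _) ?_
        rw [show spow d (pairOf base) (Int.toNat 1) = pairOf base from by
          show spow d (pairOf base) 1 = _; simp [spow, pmul_one]]
        exact cong_refl n _
    have hfin : red n (pmul d (pairOf (if PySem.Int.mod m 2 = 1 then prodElts res base d n else res))
        (spow d (pairOf (prodElts base base d n)) (m / 2).toNat))
        = red n (pmul d (pairOf res) (spow d (pairOf base) K)) := by
      apply red_cong_eq hn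
      refine cong_trans (pmul_cong hres hbase) ?_
      rw [pmul_assoc, ← spow_add, show (m % 2).toNat + 2 * (m / 2).toNat = K by omega]
      exact cong_refl n _
    rw [hfin]

-- ===== VERDICT (by name: the statement is the Claim_ definition above) =====
theorem powOfAPlusBSqrtD_spec : Claim_equal_powOfAPlusBSqrtD := by
  intro ll m d n _ hpre
  unfold Spec_powOfAPlusBSqrtD powOfAPlusBSqrtD_alt
  obtain ⟨hm0, hrest⟩ := hpre
  by_cases h0 : m = 0
  · subst h0; rw [powOfAPlusBSqrtD]; norm_num
  · by_cases h1 : m = 1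
    · subst h1; rw [powOfAPlusBSqrtD]; norm_num
    · have hm2 : 2 ≤ m := by omega
      obtain ⟨hlen, hn⟩ := hrest hm2
      rw [if_neg h0, if_neg h1]
      rw [A_spec ll d n hn m hm2, loop_spec d n hn m (by omega) [1, 0] ll]
      rw [pairOf_pair, one_pmul]
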